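-- pv_equiv track=rewrite | github.com/MatthewDaws/AdventCode23 | advent/eight.py | multiple_paths
-- ===== SOURCE A (Python) =====
-- def _move(lookup, direction, cur):
--     if direction == "L":
--         return lookup[cur][0]
--     elif direction == "R":
--         return lookup[cur][1]
--     raise ValueError()
--
-- def multiple_paths(lr, lookup):
--     current_keys = [key for key in lookup if key[-1]=="A"]
--     count = 0
--     for direction in lr:
--         count += 1
--         for index in range(len(current_keys)):
--             current_keys[index] = _move(lookup, direction, current_keys[index])
--         if all(key[-1]=="Z" for key in current_keys):
--             return count
-- ===== SOURCE B (Python) =====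
-- def multiple_paths(lr, lookup):
--     candidate = set(range(1, len(lr) + 1))
--     for key in lookup:
--         if key[-1] != "A":
--             continue
--         cur = key
--         hits = set()
--         for step, direction in enumerate(lr, 1):
--             if direction == "L":
--                 cur = lookup[cur][0]
--             elif direction == "R":
--                 cur = lookup[cur][1]
--             else:
--                 raise ValueError()
--             if cur[-1] == "Z":
--                 hits.add(step)
--         candidate &= hits
--     return min(candidate) if candidate else None
-- ===== Notes on version B (the rewrite author's own statement) =====
-- stated objective: alternative
-- what changed: A advances all ghost paths in lockstep and tests all-Z after every instruction; B simulates each starting key alone through the instruction list, collects the 1-based steps at which that path stands on a *Z node into a set, intersects these hit-sets with the candidate set {1..len(lr)}, and returns its minimum (None if empty).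
-- outside the precondition, e.g. on multiple_paths(['L', 'X'], {'AA': ['ZZ', 'ZZ'], 'ZZ': ['ZZ', 'ZZ']}): A returns 1, B raises ValueError; on multiple_paths(['L', 'L', 'L'], {'AA': ['ZZ', 'ZZ'], 'ZZ': ['QQ', 'ZZ']}): A returns 1, B raises KeyError
import Mathlib
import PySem

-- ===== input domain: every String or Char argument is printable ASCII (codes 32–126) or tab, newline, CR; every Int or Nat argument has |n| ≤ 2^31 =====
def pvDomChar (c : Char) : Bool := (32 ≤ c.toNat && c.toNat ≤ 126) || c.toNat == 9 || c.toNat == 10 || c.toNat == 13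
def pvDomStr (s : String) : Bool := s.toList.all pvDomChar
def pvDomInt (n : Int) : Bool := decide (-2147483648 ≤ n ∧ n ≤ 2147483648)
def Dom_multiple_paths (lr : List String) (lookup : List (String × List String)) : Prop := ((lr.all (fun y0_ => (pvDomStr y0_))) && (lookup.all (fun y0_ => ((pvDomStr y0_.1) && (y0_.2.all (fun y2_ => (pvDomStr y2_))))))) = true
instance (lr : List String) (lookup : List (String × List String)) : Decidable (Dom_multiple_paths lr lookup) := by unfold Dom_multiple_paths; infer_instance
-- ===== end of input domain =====

-- B replaces A's lockstep all-paths simulation by per-path hit-sets intersected with the candidate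
-- step set {1..len(lr)} (alternative decomposition, same cost; equivalence proved on Pre_).

-- ===== PORT A =====
-- `for key in lookup` iterates the dict's distinct keys in first-occurrence order (shared by both ports)
def pvKeys (lookup : List (String × List String)) : List String :=
  PySem.List.dedup (lookup.map (·.1))

-- key[-1] == "A" / "Z"; for key = "" Python raises IndexError (excluded by Pre_), here false
def pvEndsA (k : String) : Bool := PySem.Str.pyGet? k (-1) == some 'A'
def pvEndsZ (k : String) : Bool := PySem.Str.pyGet? k (-1) == some 'Z'

-- port of _move; none = the ValueError / KeyError / IndexError Python raises (excluded by Pre_)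
def pvMove? (lookup : List (String × List String)) (direction cur : String) : Option String :=
  if direction == "L" then
    (PySem.Dict.get? (PySem.Dict.mk lookup) cur).bind (fun v => PySem.List.pyGet? v 0)
  else if direction == "R" then
    (PySem.Dict.get? (PySem.Dict.mk lookup) cur).bind (fun v => PySem.List.pyGet? v 1)
  else none

-- A's main loop; outer none = an exception escaped (outside Pre_), some none = Python's fall-through None
def pvLoopA (lookup : List (String × List String)) :
    List String → List String → Int → Option (Option Int)
  | [], _, _ => some none
  | d :: rest, keys, count =>
    match keys.mapM (fun k => pvMove? lookup d k) with
    | none => none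
    | some keys' =>
      if keys'.all pvEndsZ then some (some (count + 1))
      else pvLoopA lookup rest keys' (count + 1)

def multiple_paths (lr : List String) (lookup : List (String × List String)) : Option Int :=
  (pvLoopA lookup lr ((pvKeys lookup).filter pvEndsA) 0).getD none

-- ===== PORT B =====
-- one ghost's solo walk through lr: the set of 1-based steps at which it stands on a *Z node
-- (none = an exception, excluded by Pre_)
def pvHitsB (lookup : List (String × List String)) (key : String) (lr : List String) :
    Option (PySem.Set Int) :=
  ((PySem.List.enumerate lr 1).foldl
    (fun (st? : Option (String × PySem.Set Int)) sd =>
      st?.bind (fun st =>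
        (if sd.2 == "L" then
           (PySem.Dict.get? (PySem.Dict.mk lookup) st.1).bind (fun v => PySem.List.pyGet? v 0)
         else if sd.2 == "R" then
           (PySem.Dict.get? (PySem.Dict.mk lookup) st.1).bind (fun v => PySem.List.pyGet? v 1)
         else none).map (fun cur =>
          (cur, if pvEndsZ cur then PySem.Set.add st.2 sd.1 else st.2))))
    (some (key, PySem.Set.empty))).map (·.2)

def multiple_paths_alt (lr : List String) (lookup : List (String × List String)) : Option Int :=
  ((pvKeys lookup).foldl
    (fun (cand? : Option (PySem.Set Int)) key =>
      cand?.bind (fun cand =>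
        if pvEndsA key then (pvHitsB lookup key lr).map (fun h => PySem.Set.inter cand h)
        else some cand))
    (some (PySem.Set.ofList (PySem.List.pyRange 1 ((lr.length : Int) + 1) 1)))).bind
    (fun cand => PySem.List.min? cand (fun x => x))

-- ===== PRECONDITION & SPEC =====
-- well-formed node: value list of length ≥ 2 whose first two entries are again nonempty dict keys
def pvNodeOK (lookup : List (String × List String)) (k : String) : Bool :=
  match PySem.Dict.get? (PySem.Dict.mk lookup) k with
  | some (a :: b :: _) =>
      !(a == "") && !(b == "") && (pvKeys lookup).contains a && (pvKeys lookup).contains b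
  | _ => false

-- Pre_: all dict keys nonempty, and either no key ends in 'A' (then _move is never called) or every
-- instruction is "L"/"R" and every node is well formed.  This is slightly narrower than A's exact
-- no-raise set: A can RETURN before reading a malformed instruction or node that B's full solo
-- simulations still touch (see claim.json cites) — such accidental early returns are excluded.
def Pre_multiple_paths (lr : List String) (lookup : List (String × List String)) : Prop :=
  (∀ k ∈ pvKeys lookup, k ≠ "") ∧
  ((∀ k ∈ pvKeys lookup, pvEndsA k = false) ∨
   ((∀ d ∈ lr, d = "L" ∨ d = "R") ∧ (∀ k ∈ pvKeys lookup, pvNodeOK lookup k = true)))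

instance (lr : List String) (lookup : List (String × List String)) :
    Decidable (Pre_multiple_paths lr lookup) := by unfold Pre_multiple_paths; infer_instance

def pvWitness_multiple_paths : List String × (List (String × List String)) :=
  (["L", "R"], [("AA", ["BB", "ZZ"]), ("BB", ["ZZ", "ZZ"]), ("ZZ", ["ZZ", "ZZ"])])

def Spec_multiple_paths (lr : List String) (lookup : List (String × List String)) (out : Option Int) : Prop := out = multiple_paths_alt lr lookup
instance (lr : List String) (lookup : List (String × List String)) (out : Option Int) : Decidable (Spec_multiple_paths lr lookup out) := by unfold Spec_multiple_paths; infer_instance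

-- ===== CLAIM (what is proved, stated in full; the proofs are below) =====
def Claim_equal_multiple_paths : Prop := ∀ (lr : List String) (lookup : List (String × List String)), Dom_multiple_paths lr lookup → Pre_multiple_paths lr lookup → Spec_multiple_paths lr lookup (multiple_paths lr lookup)

-- ===== LEMMAS AND PROOFS =====

-- pure (exception-free) child step and path; both ports reduce to these under Pre_
def pvChild (lookup : List (String × List String)) (d k : String) : String :=
  if d == "L" then ((PySem.Dict.get? (PySem.Dict.mk lookup) k).getD []).getD 0 ""
  else ((PySem.Dict.get? (PySem.Dict.mk lookup) k).getD []).getD 1 ""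

def pvPath (lookup : List (String × List String)) (k : String) (ds : List String) : String :=
  ds.foldl (fun c d => pvChild lookup d c) k

-- pure form of A's loop
def pvFindP (lookup : List (String × List String)) :
    List String → List String → Int → Option Int
  | [], _, _ => none
  | d :: rest, ks, count =>
    if (ks.map (pvChild lookup d)).all pvEndsZ then some (count + 1)
    else pvFindP lookup rest (ks.map (pvChild lookup d)) (count + 1)

-- pure form of B's hit set for one key
def pvHitsP (lookup : List (String × List String)) (lr : List String) (k : String) : List Int :=
  ((List.range lr.length).filter
    (fun j => pvEndsZ (pvPath lookup k (lr.take (j + 1))))).map (fun j : Nat => ((1 : Int) + (j : Int)))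

theorem pv_find?_congr {α : Type} {p q : α → Bool} : ∀ (l : List α),
    (∀ a ∈ l, p a = q a) → l.find? p = l.find? q := by
  intro l h
  induction l with
  | nil => rfl
  | cons x t ih =>
    simp only [List.find?_cons]
    rw [h x (List.mem_cons_self)]
    cases q x
    · exact ih (fun a ha => h a (List.mem_cons_of_mem _ ha))
    · rfl

theorem pv_foldl_add_nodup {α : Type} [BEq α] [LawfulBEq α] : ∀ (l : List α) (acc : List α),
    l.Nodup → (∀ x ∈ l, x ∉ acc) → l.foldl PySem.Set.add acc = acc ++ l := by
  intro l
  induction l with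
  | nil => simp
  | cons x t ih =>
    intro acc hnd hfr
    have hx : ¬ x ∈ acc := hfr x List.mem_cons_self
    have hadd : PySem.Set.add acc x = acc ++ [x] := by
      simp [PySem.Set.add, List.contains_eq_mem, hx]
    simp only [List.foldl_cons, hadd]
    rw [ih (acc ++ [x]) hnd.of_cons]
    · simp
    · intro y hy
      simp only [List.mem_append, List.mem_singleton]
      rintro (h1 | rfl)
      · exact hfr y (List.mem_cons_of_mem _ hy) h1
      · exact (List.nodup_cons.mp hnd).1 hy

theorem pv_ofList_nodup {α : Type} [BEq α] [LawfulBEq α] (l : List α) (h : l.Nodup) :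
    PySem.Set.ofList l = l := by
  rw [PySem.Set.ofList_eq_foldl]
  simpa using pv_foldl_add_nodup l [] h (by simp)

theorem pv_min?_sorted : ∀ (l : List Int), l.Pairwise (· < ·) →
    PySem.List.min? l (fun x => x) = l.head? := by
  intro l hl
  cases l with
  | nil => simp [PySem.List.min?]
  | cons x t =>
    rw [PySem.List.min?_id_cons]
    simp only [List.head?_cons, Option.some.injEq]
    have hle : ∀ y ∈ t, x ≤ y := fun y hy => le_of_lt ((List.pairwise_cons.mp hl).1 y hy)
    clear hl
    induction t with
    | nil => rfl
    | cons y t ih =>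
      simp only [List.foldl_cons]
      rw [min_eq_left (hle y List.mem_cons_self)]
      exact ih (fun z hz => hle z (List.mem_cons_of_mem _ hz))

theorem pv_move_eq (lookup : List (String × List String)) (d k : String)
    (hd : d = "L" ∨ d = "R") (hk : k ∈ pvKeys lookup)
    (hok : ∀ k ∈ pvKeys lookup, pvNodeOK lookup k = true) :
    pvMove? lookup d k = some (pvChild lookup d k) ∧
    pvChild lookup d k ∈ pvKeys lookup ∧ pvChild lookup d k ≠ "" := by
  have h := hok k hk
  unfold pvNodeOK at h
  rcases hg : PySem.Dict.get? (PySem.Dict.mk lookup) k with _ | v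
  · rw [hg] at h; simp at h
  · rw [hg] at h
    match v, h with
    | a :: b :: t, h =>
      simp only [Bool.and_eq_true, Bool.not_eq_true', beq_eq_false_iff_ne, ne_eq,
        List.contains_eq_mem, decide_eq_true_eq] at h
      obtain ⟨⟨⟨ha, hb⟩, hma⟩, hmb⟩ := h
      rcases hd with rfl | rfl
      · refine ⟨?_, ?_, ?_⟩ <;>
          simp [pvMove?, pvChild, hg, PySem.List.pyGet?, PySem.List.pyIdx?, hma, ha]
      · refine ⟨?_, ?_, ?_⟩ <;>
          simp [pvMove?, pvChild, hg, PySem.List.pyGet?, PySem.List.pyIdx?, hmb, hb]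

theorem pv_mapM_move (lookup : List (String × List String)) (d : String)
    (hd : d = "L" ∨ d = "R") (hok : ∀ k ∈ pvKeys lookup, pvNodeOK lookup k = true) :
    ∀ ks : List String, (∀ k ∈ ks, k ∈ pvKeys lookup) →
    ks.mapM (fun k => pvMove? lookup d k) = some (ks.map (pvChild lookup d)) := by
  intro ks hks
  induction ks with
  | nil => rfl
  | cons x t ih =>
    have hx := pv_move_eq lookup d x hd (hks x List.mem_cons_self) hok
    simp [List.mapM_cons, hx.1, ih (fun k hk => hks k (List.mem_cons_of_mem _ hk))]

theorem pv_loopA_eq (lookup : List (String × List String))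
    (hok : ∀ k ∈ pvKeys lookup, pvNodeOK lookup k = true) :
    ∀ (lrs ks : List String) (count : Int), (∀ d ∈ lrs, d = "L" ∨ d = "R") →
    (∀ k ∈ ks, k ∈ pvKeys lookup) →
    pvLoopA lookup lrs ks count = some (pvFindP lookup lrs ks count) := by
  intro lrs
  induction lrs with
  | nil => intro ks count _ _; rfl
  | cons d rest ih =>
    intro ks count hlr hks
    have hd := hlr d List.mem_cons_self
    rw [pvLoopA, pv_mapM_move lookup d hd hok ks hks]
    show (if (ks.map (pvChild lookup d)).all pvEndsZ then some (some (count + 1))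
          else pvLoopA lookup rest (ks.map (pvChild lookup d)) (count + 1)) = _
    rw [pvFindP]
    split
    · rfl
    · exact ih (ks.map (pvChild lookup d)) (count + 1)
        (fun e he => hlr e (List.mem_cons_of_mem _ he))
        (fun k hk => by
          obtain ⟨k0, hk0, rfl⟩ := List.mem_map.mp hk
          exact (pv_move_eq lookup d k0 hd (hks k0 hk0) hok).2.1)

theorem pv_findP_char (lookup : List (String × List String)) :
    ∀ (lrs ks : List String) (count : Int),
    pvFindP lookup lrs ks count =
      ((List.range lrs.length).find?
        (fun j => ks.all (fun k => pvEndsZ (pvPath lookup k (lrs.take (j + 1)))))).map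
        (fun j : Nat => count + (j : Int) + 1) := by
  intro lrs
  induction lrs with
  | nil => intro ks count; rfl
  | cons d rest ih =>
    intro ks count
    rw [pvFindP]
    have h0 : (ks.all fun k => pvEndsZ (pvPath lookup k ((d :: rest).take (0 + 1)))) =
        (ks.map (pvChild lookup d)).all pvEndsZ := by
      simp only [List.all_map]; rfl
    simp only [List.length_cons, List.range_succ_eq_map]
    by_cases hall : (ks.map (pvChild lookup d)).all pvEndsZ = true
    · rw [if_pos hall, List.find?_cons_of_pos (by rw [h0]; exact hall)]
      simp
    · have hallf : (ks.map (pvChild lookup d)).all pvEndsZ = false := by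
        rw [← Bool.not_eq_true]; exact hall
      rw [if_neg hall, List.find?_cons_of_neg (by rw [h0, hallf]; simp),
        List.find?_map, ih (ks.map (pvChild lookup d)) (count + 1)]
      have hpred : ∀ j ∈ List.range rest.length,
          ((ks.map (pvChild lookup d)).all fun k => pvEndsZ (pvPath lookup k (rest.take (j + 1)))) =
          ((fun j => ks.all fun k => pvEndsZ (pvPath lookup k ((d :: rest).take (j + 1)))) ∘ Nat.succ) j := by
        intro j _
        simp only [Function.comp, List.all_map]
        rfl
      rw [pv_find?_congr (List.range rest.length) hpred]
      rcases List.find?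
          ((fun j => ks.all fun k => pvEndsZ (pvPath lookup k ((d :: rest).take (j + 1)))) ∘ Nat.succ)
          (List.range rest.length) with _ | j
      · rfl
      · show some (count + 1 + (j : Int) + 1) = some (count + ((j + 1 : Nat) : Int) + 1)
        congr 1
        push_cast
        ring

theorem pv_hits_fold (lookup : List (String × List String))
    (hok : ∀ k ∈ pvKeys lookup, pvNodeOK lookup k = true) :
    ∀ (lrs : List String) (s : Nat) (cur : String) (acc : PySem.Set Int),
    (∀ d ∈ lrs, d = "L" ∨ d = "R") → cur ∈ pvKeys lookup → (∀ x ∈ acc, x < (s : Int)) →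
    (PySem.List.enumerate lrs (s : Int)).foldl
      (fun (st? : Option (String × PySem.Set Int)) sd =>
        st?.bind (fun st =>
          (if sd.2 == "L" then
             (PySem.Dict.get? (PySem.Dict.mk lookup) st.1).bind (fun v => PySem.List.pyGet? v 0)
           else if sd.2 == "R" then
             (PySem.Dict.get? (PySem.Dict.mk lookup) st.1).bind (fun v => PySem.List.pyGet? v 1)
           else none).map (fun cur =>
            (cur, if pvEndsZ cur then PySem.Set.add st.2 sd.1 else st.2))))
      (some (cur, acc)) =
    some (pvPath lookup cur lrs,
      acc ++ ((List.range lrs.length).filter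
        (fun j => pvEndsZ (pvPath lookup cur (lrs.take (j + 1))))).map
          (fun j : Nat => ((s : Int) + j))) := by
  intro lrs
  induction lrs with
  | nil =>
    intro s cur acc _ _ _
    simp [PySem.List.enumerate, pvPath]
  | cons d rest ih =>
    intro s cur acc hlr hcur hacc
    have hd := hlr d List.mem_cons_self
    have hmv := pv_move_eq lookup d cur hd hcur hok
    rw [PySem.List.enumerate_cons, List.foldl_cons]
    have hstep :
        (some (cur, acc)).bind (fun st : String × PySem.Set Int =>
          (if ((s : Int), d).2 == "L" then
             (PySem.Dict.get? (PySem.Dict.mk lookup) st.1).bind (fun v => PySem.List.pyGet? v 0)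
           else if ((s : Int), d).2 == "R" then
             (PySem.Dict.get? (PySem.Dict.mk lookup) st.1).bind (fun v => PySem.List.pyGet? v 1)
           else none).map (fun c =>
            (c, if pvEndsZ c then PySem.Set.add st.2 ((s : Int), d).1 else st.2))) =
        some (pvChild lookup d cur,
          if pvEndsZ (pvChild lookup d cur) then PySem.Set.add acc (s : Int) else acc) := by
      have hmv1 : pvMove? lookup d cur = some (pvChild lookup d cur) := hmv.1
      show Option.map _ (pvMove? lookup d cur) = _
      rw [hmv1]
      rfl
    rw [hstep]
    have hadd : (if pvEndsZ (pvChild lookup d cur) then PySem.Set.add acc (s : Int) else acc) =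
        acc ++ (if pvEndsZ (pvChild lookup d cur) then [(s : Int)] else []) := by
      split
      · have hsn : ¬ ((s : Int) ∈ acc) := fun hmem => absurd rfl (ne_of_lt (hacc _ hmem))
        simp [PySem.Set.add, List.contains_eq_mem, hsn]
      · simp
    rw [hadd]
    have hcast : ((s : Int) + 1) = (((s + 1 : Nat)) : Int) := by push_cast; ring
    rw [hcast]
    rw [ih (s + 1) (pvChild lookup d cur)
      (acc ++ (if pvEndsZ (pvChild lookup d cur) then [(s : Int)] else []))
      (fun e he => hlr e (List.mem_cons_of_mem _ he)) hmv.2.1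
      (by
        intro x hx
        rcases List.mem_append.mp hx with h1 | h2
        · push_cast; exact lt_trans (hacc x h1) (by omega)
        · split at h2
          · rcases List.mem_singleton.mp h2 with rfl; push_cast; omega
          · cases h2)]
    have hpath : pvPath lookup cur (d :: rest) = pvPath lookup (pvChild lookup d cur) rest := rfl
    rw [hpath]
    congr 1
    congr 1
    have h0 : pvPath lookup cur ((d :: rest).take (0 + 1)) = pvChild lookup d cur := rfl
    have hpred : ((fun j => pvEndsZ (pvPath lookup cur ((d :: rest).take (j + 1)))) ∘ Nat.succ) =
        (fun j => pvEndsZ (pvPath lookup (pvChild lookup d cur) (rest.take (j + 1)))) := by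
      funext j; rfl
    rw [List.length_cons, List.range_succ_eq_map, List.filter_cons, List.filter_map, hpred, h0]
    by_cases hz : pvEndsZ (pvChild lookup d cur) = true
    · rw [if_pos hz, if_pos hz]
      rw [List.append_assoc]
      congr 1
      rw [List.map_cons, List.map_map, List.singleton_append]
      congr 1
      apply List.map_congr_left
      intro x _
      simp only [Function.comp]
      push_cast
      ring
    · rw [if_neg hz, if_neg hz]
      rw [List.append_nil, List.map_map]
      congr 1
      apply List.map_congr_left
      intro x _
      simp only [Function.comp]
      push_cast
      ring

theorem pv_hits_eq (lookup : List (String × List String))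
    (hok : ∀ k ∈ pvKeys lookup, pvNodeOK lookup k = true) (lr : List String)
    (hlr : ∀ d ∈ lr, d = "L" ∨ d = "R") (k : String) (hk : k ∈ pvKeys lookup) :
    pvHitsB lookup k lr = some (pvHitsP lookup lr k) := by
  unfold pvHitsB
  have h := pv_hits_fold lookup hok lr 1 k PySem.Set.empty hlr hk (by intro x hx; cases hx)
  rw [show ((1 : Nat) : Int) = (1 : Int) from rfl] at h
  rw [h]
  simp [pvHitsP, PySem.Set.empty]

theorem pv_cand_fold (lookup : List (String × List String)) (lr : List String)
    (hok : ∀ k ∈ pvKeys lookup, pvNodeOK lookup k = true)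
    (hlr : ∀ d ∈ lr, d = "L" ∨ d = "R") :
    ∀ (klist : List String) (c : PySem.Set Int), (∀ k ∈ klist, k ∈ pvKeys lookup) →
    klist.foldl
      (fun (cand? : Option (PySem.Set Int)) key =>
        cand?.bind (fun cand =>
          if pvEndsA key then (pvHitsB lookup key lr).map (fun h => PySem.Set.inter cand h)
          else some cand))
      (some c) =
    some (c.filter (fun x => (klist.filter pvEndsA).all (fun k => (pvHitsP lookup lr k).contains x))) := by
  intro klist
  induction klist with
  | nil => intro c _; simp
  | cons key kt ih =>
    intro c hks
    rw [List.foldl_cons, List.filter_cons]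
    have hrest := fun (c' : PySem.Set Int) => ih c' (fun k hk => hks k (List.mem_cons_of_mem _ hk))
    by_cases hA : pvEndsA key = true
    · have hstep : ((some c).bind (fun cand =>
          if pvEndsA key then (pvHitsB lookup key lr).map (fun h => PySem.Set.inter cand h)
          else some cand) : Option (PySem.Set Int)) =
          some (PySem.Set.inter c (pvHitsP lookup lr key)) := by
        rw [pv_hits_eq lookup hok lr hlr key (hks key List.mem_cons_self)]
        simp [hA]
      rw [hstep, hrest, if_pos hA]
      congr 1
      have hint : PySem.Set.inter c (pvHitsP lookup lr key) =
          c.filter (fun x => (pvHitsP lookup lr key).contains x) := by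
        simp [PySem.Set.inter]
      rw [hint, List.filter_filter]
      apply List.filter_congr
      intro x _
      simp [Bool.and_comm]
    · have hAf : pvEndsA key = false := by rw [← Bool.not_eq_true]; exact hA
      have hstep : ((some c).bind (fun cand =>
          if pvEndsA key then (pvHitsB lookup key lr).map (fun h => PySem.Set.inter cand h)
          else some cand) : Option (PySem.Set Int)) = some c := by
        simp [hAf]
      rw [hstep, hrest, if_neg hA]

theorem pv_all_congr {α : Type} {p q : α → Bool} : ∀ (l : List α),
    (∀ x ∈ l, p x = q x) → l.all p = l.all q := by
  intro l h
  induction l with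
  | nil => rfl
  | cons x t ih =>
    simp only [List.all_cons, h x List.mem_cons_self,
      ih (fun y hy => h y (List.mem_cons_of_mem _ hy))]

theorem pv_hitsP_contains (lookup : List (String × List String)) (lr : List String)
    (k : String) (j : Nat) (hj : j < lr.length) :
    (pvHitsP lookup lr k).contains ((1 : Int) + j) =
      pvEndsZ (pvPath lookup k (lr.take (j + 1))) := by
  by_cases hq : pvEndsZ (pvPath lookup k (lr.take (j + 1))) = true
  · rw [hq, List.contains_eq_mem, decide_eq_true_eq, pvHitsP]
    exact List.mem_map.mpr ⟨j, List.mem_filter.mpr ⟨List.mem_range.mpr hj, hq⟩, rfl⟩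
  · have hqf : pvEndsZ (pvPath lookup k (lr.take (j + 1))) = false := by
      rw [← Bool.not_eq_true]; exact hq
    rw [hqf, List.contains_eq_mem, decide_eq_false_iff_not, pvHitsP]
    intro hmem
    obtain ⟨a, hmf, heq⟩ := List.mem_map.mp hmem
    obtain ⟨_, hZ⟩ := List.mem_filter.mp hmf
    have haj : a = j := by
      have h1 : (a : Int) = (j : Int) := by omega
      exact_mod_cast h1
    subst haj
    exact hq hZ

-- B's fold over keys on which no key starts a path (no key ends in 'A'): the candidate is untouched
theorem pv_skip_fold (lookup : List (String × List String)) (lr : List String) :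
    ∀ (klist : List String) (c? : Option (PySem.Set Int)), (∀ k ∈ klist, pvEndsA k = false) →
    klist.foldl
      (fun (cand? : Option (PySem.Set Int)) key =>
        cand?.bind (fun cand =>
          if pvEndsA key then (pvHitsB lookup key lr).map (fun h => PySem.Set.inter cand h)
          else some cand))
      c? = c? := by
  intro klist
  induction klist with
  | nil => intro c? _; rfl
  | cons key kt ih =>
    intro c? h
    rw [List.foldl_cons]
    have : (c?.bind (fun cand =>
        if pvEndsA key then (pvHitsB lookup key lr).map (fun h => PySem.Set.inter cand h)
        else some cand)) = c? := by
      cases c? <;> simp [h key List.mem_cons_self]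
    rw [this]
    exact ih c? (fun k hk => h k (List.mem_cons_of_mem _ hk))

-- the candidate step set as a plain list
theorem pv_cand0 (lr : List String) :
    PySem.Set.ofList (PySem.List.pyRange 1 ((lr.length : Int) + 1) 1) =
      PySem.List.pyRange 1 ((lr.length : Int) + 1) 1 :=
  pv_ofList_nodup _ (PySem.List.nodup_pyRange_one 1 _)

-- ===== VERDICT (by name: the statement is the Claim_ definition above) =====
theorem multiple_paths_spec : Claim_equal_multiple_paths := by
  intro lr lookup _ hpre
  unfold Spec_multiple_paths
  obtain ⟨hne, hcase⟩ := hpre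
  rcases hcase with hnoA | ⟨hlr, hok⟩
  · -- no key ends in 'A': A returns 1 on a nonempty lr, None on an empty one
    have hstart : (pvKeys lookup).filter pvEndsA = [] := by
      apply List.filter_eq_nil_iff.mpr
      intro k hk
      simp [hnoA k hk]
    rw [multiple_paths, multiple_paths_alt, hstart,
      pv_skip_fold lookup lr (pvKeys lookup) _ hnoA, pv_cand0]
    cases lr with
    | nil =>
      rw [show PySem.List.pyRange 1 (((List.length ([] : List String)) : Int) + 1) 1 = [] from rfl]
      rfl
    | cons d rest =>
      have hcons : PySem.List.pyRange 1 ((((d :: rest).length) : Int) + 1) 1 =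
          1 :: PySem.List.pyRange 2 ((((d :: rest).length) : Int) + 1) 1 := by
        rw [PySem.List.pyRange_one_cons (by simp)]
        norm_num
      have hpw : (1 :: PySem.List.pyRange 2 ((((d :: rest).length) : Int) + 1) 1).Pairwise (· < ·) := by
        rw [← hcons]
        exact PySem.List.pairwise_lt_pyRange_one 1 _
      rw [hcons]
      show some ((0 : Int) + 1) =
        (some (1 :: PySem.List.pyRange 2 ((((d :: rest).length) : Int) + 1) 1)).bind
          (fun cand => PySem.List.min? cand (fun x => x))
      rw [Option.bind_some, pv_min?_sorted _ hpw]
      norm_num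
  · -- the main case
    have hsub : ∀ k ∈ (pvKeys lookup).filter pvEndsA, k ∈ pvKeys lookup :=
      fun k hk => List.mem_of_mem_filter hk
    rw [multiple_paths, pv_loopA_eq lookup hok lr _ 0 hlr hsub, Option.getD_some,
      pv_findP_char]
    rw [multiple_paths_alt,
      pv_cand_fold lookup lr hok hlr (pvKeys lookup) _ (fun k hk => hk), pv_cand0]
    rw [Option.bind_some]
    have hpwf : ((PySem.List.pyRange 1 ((lr.length : Int) + 1) 1).filter
        (fun x => ((pvKeys lookup).filter pvEndsA).all
          (fun k => (pvHitsP lookup lr k).contains x))).Pairwise (· < ·) :=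
      List.Pairwise.filter _ (PySem.List.pairwise_lt_pyRange_one 1 _)
    rw [pv_min?_sorted _ hpwf, List.head?_filter]
    have hrange : PySem.List.pyRange 1 ((lr.length : Int) + 1) 1 =
        (List.range lr.length).map (fun k : Nat => 1 + (k : Int)) := by
      rw [PySem.List.pyRange_one]
      have : (((lr.length : Int) + 1) - 1).toNat = lr.length := by omega
      rw [this]
    rw [hrange, List.find?_map]
    have hpred : ∀ j ∈ List.range lr.length,
        ((fun x => ((pvKeys lookup).filter pvEndsA).all (fun k => (pvHitsP lookup lr k).contains x)) ∘
          (fun k : Nat => 1 + (k : Int))) j =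
        (fun j => ((pvKeys lookup).filter pvEndsA).all
          (fun k => pvEndsZ (pvPath lookup k (lr.take (j + 1))))) j := by
      intro j hj
      simp only [Function.comp]
      exact pv_all_congr _ (fun k _ => pv_hitsP_contains lookup lr k j (List.mem_range.mp hj))
    rw [pv_find?_congr (List.range lr.length) hpred]
    cases hfind : List.find? (fun j => ((pvKeys lookup).filter pvEndsA).all
        (fun k => pvEndsZ (pvPath lookup k (lr.take (j + 1))))) (List.range lr.length) with
    | none => rfl
    | some j =>
      simp only [Option.map_some]
      congr 1
      ring
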